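-- pv_equiv track=rewrite | github.com/tommycarstensen/tc9 | sandbox/merge.py | parse_gt_bed
-- ===== SOURCE A (Python) =====
-- def parse_gt_bed(gt, ext_out, n_samples, bool_rev = False):
--
--     if ext_out != '.bed':
--         stop_write_more_code
--
--     if bool_rev:
--         d_gt = {
--             '.vcf':{'00':'1/1','10':'./.','11':'0/0','01':'0/1',},
--             '.bed':{'00':'11','10':'10','11':'00','01':'01',},
--             }
--     else:
--         d_gt = {
--             '.vcf':{'00':'0/0','10':'./.','11':'1/1','01':'0/1',},
--             '.bed':{'00':'00','10':'10','11':'11','01':'01',},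
--             }
--
--     d_sep = {'.bed':''}
--
--     gt_out = ''
--     cnt_samples = 0
--     for byte in gt:
-- ##                        s8 = str(bin(byte)[2:]).zfill(8)
--         s8 = '{:08b}'.format(byte)#[::-1]
--         for i in range(8-1,1-1,-2):
--             cnt_samples += 1
--             if cnt_samples > n_samples:
--                 break
--             GT = s8[i-1:i+1][::-1]
--             gt_out += d_sep[ext_out]+d_gt[ext_out][GT]
--
--     return gt_out
-- ===== SOURCE B (Python) =====
-- def parse_gt_bed(gt, ext_out, n_samples, bool_rev = False):
--     if ext_out != '.bed':
--         raise NameError('only .bed output is supported')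
--     pair = ('11', '10', '01', '00') if bool_rev else ('00', '10', '01', '11')
--     table = {b: ''.join(pair[(b >> s) & 3] for s in (0, 2, 4, 6)) for b in range(256)}
--     if n_samples <= 0:
--         return ''
--     n_bytes = min(len(gt), (n_samples + 3) // 4)
--     out = ''.join(table[b] for b in gt[:n_bytes])
--     return out[:2 * n_samples]
-- ===== Notes on version B (the rewrite author's own statement) =====
-- stated objective: simpler
-- what changed: Replaces the per-byte binary-string formatting, inner index loop with a sample counter and break, and nested dict lookups by a 256-entry table of pre-decoded 4-genotype strings built with bit arithmetic, joined over just the needed bytes and truncated once at 2*n_samples.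
-- outside the precondition, e.g. on parse_gt_bed([-5], '.bed', 2, False): A returns '1010', B raises KeyError; on parse_gt_bed([256], '.bed', 4, False): A returns '00000001', B raises KeyError
import Mathlib
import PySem

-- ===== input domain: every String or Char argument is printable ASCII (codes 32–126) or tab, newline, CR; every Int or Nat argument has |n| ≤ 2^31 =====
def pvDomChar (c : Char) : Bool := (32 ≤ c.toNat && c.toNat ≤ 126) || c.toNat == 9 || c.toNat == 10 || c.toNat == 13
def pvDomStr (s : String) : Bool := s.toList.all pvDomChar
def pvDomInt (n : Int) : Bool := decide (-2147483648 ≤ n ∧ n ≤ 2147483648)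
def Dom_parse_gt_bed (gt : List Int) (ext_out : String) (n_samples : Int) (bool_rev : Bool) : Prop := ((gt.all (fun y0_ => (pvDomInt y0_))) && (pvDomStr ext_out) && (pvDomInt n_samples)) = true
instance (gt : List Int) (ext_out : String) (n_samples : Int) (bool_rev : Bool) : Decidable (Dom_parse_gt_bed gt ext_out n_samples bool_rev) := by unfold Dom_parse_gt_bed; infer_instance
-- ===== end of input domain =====

-- B replaces A's per-byte bit-string formatting + inner counter loop by a precomputed
-- 256-entry decode table joined over the bytes and truncated once (objective: simpler).

-- ===== PORT A =====

-- bin(n) without the '0b' prefix (library base-2 digits; '0' for n = 0, like Python's format)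
def pvBin (n : Nat) : List Char := Nat.toDigits 2 n

-- '{:08b}'.format(b): sign-aware zero padding to width 8 (exact for every Int)
def pvFmt8 (b : Int) : List Char :=
  if b < 0 then
    let d := pvBin b.natAbs
    '-' :: (List.replicate (7 - d.length) '0' ++ d)
  else
    let d := pvBin b.toNat
    List.replicate (8 - d.length) '0' ++ d

-- the d_gt dictionary of A (both branches of `if bool_rev`)
def pvDgt (bool_rev : Bool) : PySem.Dict String (PySem.Dict String String) :=
  if bool_rev then
    PySem.Dict.ofList [(".vcf", PySem.Dict.ofList [("00","1/1"),("10","./."),("11","0/0"),("01","0/1")]),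
                       (".bed", PySem.Dict.ofList [("00","11"),("10","10"),("11","00"),("01","01")])]
  else
    PySem.Dict.ofList [(".vcf", PySem.Dict.ofList [("00","0/0"),("10","./."),("11","1/1"),("01","0/1")]),
                       (".bed", PySem.Dict.ofList [("00","00"),("10","10"),("11","11"),("01","01")])]

def pvDsep : PySem.Dict String String := PySem.Dict.ofList [(".bed","")]

-- the inner `for i in range(8-1,1-1,-2)` loop with its `break`; state = (gt_out, cnt_samples).
-- d_sep[ext_out] / d_gt[ext_out][GT] raise KeyError when absent (excluded by Pre_): getD "" stands for the value that is always found there.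
def pvInnerA (dg : PySem.Dict String (PySem.Dict String String)) (ext_out : String)
    (s8 : List Char) (n : Int) : List Int → List Char × Int → List Char × Int
  | [], st => st
  | i :: rest, (out, cnt) =>
    let cnt := cnt + 1
    if cnt > n then (out, cnt)
    else
      let GT := String.mk ((PySem.List.slice s8 (some (i-1)) (some (i+1))).reverse)
      pvInnerA dg ext_out s8 n rest
        (out ++ (PySem.Dict.getD pvDsep ext_out "").toList
             ++ (PySem.Dict.getD (PySem.Dict.getD dg ext_out (PySem.Dict.ofList [])) GT "").toList,
         cnt)

def parse_gt_bed (gt : List Int) (ext_out : String) (n_samples : Int) (bool_rev : Bool) : String :=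
  if ext_out ≠ ".bed" then ""   -- Python raises NameError here; excluded by Pre_
  else
    let dg := pvDgt bool_rev
    let st := gt.foldl
      (fun st byte => pvInnerA dg ext_out (pvFmt8 byte) n_samples (PySem.List.pyRange (8-1) (1-1) (-2)) st)
      ([], 0)
    String.mk st.1

-- ===== PORT B =====

-- pair[(b >> s) & 3]
def pvPair (rev : Bool) (q : Nat) : String :=
  (if rev then ["11","10","01","00"] else ["00","10","01","11"]).getD q ""

-- ''.join(pair[(b >> s) & 3] for s in (0, 2, 4, 6))
def pvEntry (rev : Bool) (b : Nat) : List Char :=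
  (([0,2,4,6] : List Nat).map (fun s => (pvPair rev ((b >>> s) % 4)).toList)).flatten

def parse_gt_bed_alt (gt : List Int) (ext_out : String) (n_samples : Int) (bool_rev : Bool) : String :=
  if ext_out ≠ ".bed" then ""   -- Python raises NameError here; excluded by Pre_
  else
    -- {b: ''.join(...) for b in range(256)}: distinct keys, so the dict's item list is the mapped list
    let table : PySem.Dict Int (List Char) :=
      PySem.Dict.mk ((List.range 256).map (fun (b : Nat) => ((b : Int), pvEntry bool_rev b)))
    if n_samples ≤ 0 then ""
    else
      let n_bytes : Int := min (gt.length : Int) (PySem.Int.floordiv (n_samples + 3) 4)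
      -- table[b] raises KeyError for b outside 0..255; excluded by Pre_
      let out := (PySem.List.slice gt none (some n_bytes)).flatMap
                   (fun b => PySem.Dict.getD table b [])
      String.mk (out.take (2 * n_samples).toNat)

-- ===== PRECONDITION & SPEC =====
-- Pre_ excludes ext_out ≠ '.bed' (A raises NameError) and inputs where an out-of-range byte
-- (outside 0..255; impossible in a real .bed record) is reached by A's sample counter: there A
-- returns a decode of a sign-bearing or overlong bit string while B raises KeyError on its table.
def Pre_parse_gt_bed (gt : List Int) (ext_out : String) (n_samples : Int) (bool_rev : Bool) : Prop :=
  ext_out = ".bed" ∧ ∀ j : Fin gt.length, (0 ≤ gt[j] ∧ gt[j] < 256) ∨ n_samples ≤ 4 * (j : Int)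
instance (gt : List Int) (ext_out : String) (n_samples : Int) (bool_rev : Bool) : Decidable (Pre_parse_gt_bed gt ext_out n_samples bool_rev) := by unfold Pre_parse_gt_bed; infer_instance

def pvWitness_parse_gt_bed : List Int × String × Int × Bool := ([108, 27], ".bed", 5, false)

def Spec_parse_gt_bed (gt : List Int) (ext_out : String) (n_samples : Int) (bool_rev : Bool) (out : String) : Prop := out = parse_gt_bed_alt gt ext_out n_samples bool_rev
instance (gt : List Int) (ext_out : String) (n_samples : Int) (bool_rev : Bool) (out : String) : Decidable (Spec_parse_gt_bed gt ext_out n_samples bool_rev out) := by unfold Spec_parse_gt_bed; infer_instance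

-- ===== CLAIM (what is proved, stated in full; the proofs are below) =====
def Claim_equal_parse_gt_bed : Prop := ∀ (gt : List Int) (ext_out : String) (n_samples : Int) (bool_rev : Bool), Dom_parse_gt_bed gt ext_out n_samples bool_rev → Pre_parse_gt_bed gt ext_out n_samples bool_rev → Spec_parse_gt_bed gt ext_out n_samples bool_rev (parse_gt_bed gt ext_out n_samples bool_rev)

-- ===== LEMMAS AND PROOFS =====

-- the four dict-decoded genotype pairs A extracts from a byte, and B's bit-arithmetic pairs
def pairsA (r : Bool) (v : Nat) : List (List Char) :=
  ([7,5,3,1] : List Int).map (fun i =>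
    (PySem.Dict.getD (PySem.Dict.getD (pvDgt r) ".bed" (PySem.Dict.ofList []))
      (String.mk ((PySem.List.slice (pvFmt8 (v:Int)) (some (i-1)) (some (i+1))).reverse)) "").toList)
def pairsB (r : Bool) (v : Nat) : List (List Char) :=
  ([0,2,4,6] : List Nat).map (fun s => (pvPair r ((v >>> s) % 4)).toList)

set_option maxRecDepth 40000 in
theorem L1 : ∀ (r : Bool) (v : Fin 256), pairsA r (v : Nat) = pairsB r (v : Nat) := by decide

theorem pairLen (r : Bool) (q : Nat) (hq : q < 4) : (pvPair r q).toList.length = 2 := by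
  interval_cases q <;> cases r <;> decide

theorem pyRange7 : PySem.List.pyRange (8-1) (1-1) (-2) = ([7,5,3,1] : List Int) := by decide

theorem inner_eq (r : Bool) (n : Int) (v : Nat) (hv : v < 256) (out : List Char) (cnt : Int) :
    pvInnerA (pvDgt r) ".bed" (pvFmt8 (v:Int)) n (PySem.List.pyRange (8-1) (1-1) (-2)) (out, cnt)
    = (out ++ (pvEntry r v).take ((2 * min (max (n - cnt) 0) 4).toNat),
       cnt + min (max (n - cnt) 0 + 1) 4) := by
  rw [pyRange7]
  have hL := L1 r ⟨v, hv⟩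
  simp only [pairsA, pairsB, List.map_cons, List.map_nil, List.cons.injEq, and_true] at hL
  obtain ⟨e1, e2, e3, e4⟩ := hL
  obtain ⟨a1, b1, hp1⟩ := List.length_eq_two.mp (pairLen r _ (Nat.mod_lt _ (by norm_num)) : (pvPair r ((v >>> 0) % 4)).toList.length = 2)
  obtain ⟨a2, b2, hp2⟩ := List.length_eq_two.mp (pairLen r _ (Nat.mod_lt _ (by norm_num)) : (pvPair r ((v >>> 2) % 4)).toList.length = 2)
  obtain ⟨a3, b3, hp3⟩ := List.length_eq_two.mp (pairLen r _ (Nat.mod_lt _ (by norm_num)) : (pvPair r ((v >>> 4) % 4)).toList.length = 2)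
  obtain ⟨a4, b4, hp4⟩ := List.length_eq_two.mp (pairLen r _ (Nat.mod_lt _ (by norm_num)) : (pvPair r ((v >>> 6) % 4)).toList.length = 2)
  rw [hp1] at e1; rw [hp2] at e2; rw [hp3] at e3; rw [hp4] at e4
  norm_num at e1 e2 e3 e4
  rw [Nat.shiftRight_zero] at hp1
  have hsep : (PySem.Dict.getD pvDsep ".bed" "") = "" := by decide
  by_cases h1 : n < cnt + 1
  · have ha : (2 * min (max (n - cnt) 0) 4).toNat = 0 := by omega
    have hc : cnt + min (max (n - cnt) 0 + 1) 4 = cnt + 1 := by omega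
    simp [pvInnerA, h1, ha, hc]
  · by_cases h2 : n < cnt + 1 + 1
    · have ha : (2 * min (max (n - cnt) 0) 4).toNat = 2 := by omega
      have hc : cnt + min (max (n - cnt) 0 + 1) 4 = cnt + 1 + 1 := by omega
      simp [pvInnerA, h1, h2, ha, hc, hsep, e1, hp1, pvEntry, hp2, hp3, hp4]
    · by_cases h3 : n < cnt + 1 + 1 + 1
      · have ha : (2 * min (max (n - cnt) 0) 4).toNat = 4 := by omega
        have hc : cnt + min (max (n - cnt) 0 + 1) 4 = cnt + 1 + 1 + 1 := by omega
        simp [pvInnerA, h1, h2, h3, ha, hc, hsep, e1, e2, pvEntry, hp1, hp2, hp3, hp4]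
      · by_cases h4 : n < cnt + 1 + 1 + 1 + 1
        · have ha : (2 * min (max (n - cnt) 0) 4).toNat = 6 := by omega
          have hc : cnt + min (max (n - cnt) 0 + 1) 4 = cnt + 1 + 1 + 1 + 1 := by omega
          simp [pvInnerA, h1, h2, h3, h4, ha, hc, hsep, e1, e2, e3, pvEntry, hp1, hp2, hp3, hp4]
        · have ha : (2 * min (max (n - cnt) 0) 4).toNat = 8 := by omega
          have hc : cnt + min (max (n - cnt) 0 + 1) 4 = cnt + 1 + 1 + 1 + 1 := by omega
          simp [pvInnerA, h1, h2, h3, h4, ha, hc, hsep, e1, e2, e3, e4, pvEntry, hp1, hp2, hp3, hp4]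

theorem inner_skip (dg : PySem.Dict String (PySem.Dict String String)) (e : String)
    (s8 : List Char) (n : Int) (out : List Char) (cnt : Int) (h : n < cnt + 1) :
    pvInnerA dg e s8 n (PySem.List.pyRange (8-1) (1-1) (-2)) (out, cnt) = (out, cnt + 1) := by
  rw [pyRange7]; simp [pvInnerA, h]

theorem entryLen (r : Bool) (v : Nat) : (pvEntry r v).length = 8 := by
  have h1 := pairLen r ((v >>> 0) % 4) (Nat.mod_lt _ (by norm_num))
  have h2 := pairLen r ((v >>> 2) % 4) (Nat.mod_lt _ (by norm_num))
  have h3 := pairLen r ((v >>> 4) % 4) (Nat.mod_lt _ (by norm_num))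
  have h4 := pairLen r ((v >>> 6) % 4) (Nat.mod_lt _ (by norm_num))
  rw [Nat.shiftRight_zero] at h1
  simp [pvEntry, h1, h2, h3, h4]

theorem fold_skip (r : Bool) (n : Int) (gt : List Int) : ∀ (out : List Char) (cnt : Int), n ≤ cnt →
    (gt.foldl (fun st byte =>
        pvInnerA (pvDgt r) ".bed" (pvFmt8 byte) n (PySem.List.pyRange (8-1) (1-1) (-2)) st) (out, cnt)).1
    = out := by
  induction gt with
  | nil => intro out cnt _; rfl
  | cons b rest ih =>
    intro out cnt h
    rw [List.foldl_cons, inner_skip _ _ _ _ _ _ (by omega)]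
    exact ih out (cnt + 1) (by omega)

theorem foldA (r : Bool) (n : Int) (gt : List Int) : ∀ (out : List Char) (cnt : Int),
    (∀ (j : Nat), (hj : j < gt.length) → (0 ≤ gt[j] ∧ gt[j] < 256) ∨ n ≤ cnt + 4 * (j : Int)) →
    (gt.foldl (fun st byte =>
        pvInnerA (pvDgt r) ".bed" (pvFmt8 byte) n (PySem.List.pyRange (8-1) (1-1) (-2)) st) (out, cnt)).1
    = out ++ (gt.flatMap (fun b => pvEntry r b.toNat)).take ((2 * max (n - cnt) 0).toNat) := by
  induction gt with
  | nil => intro out cnt h; simp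
  | cons b rest ih =>
    intro out cnt h
    by_cases hb : 0 ≤ b ∧ b < 256
    · have hv : b.toNat < 256 := by omega
      have hcast : ((b.toNat : Nat) : Int) = b := Int.toNat_of_nonneg hb.1
      rw [List.foldl_cons]
      conv_lhs => rw [show pvFmt8 b = pvFmt8 ((b.toNat : Nat) : Int) by rw [hcast]]
      rw [inner_eq r n b.toNat hv, ih _ _ ?hrest, List.flatMap_cons, List.append_assoc]
      case hrest =>
        intro j hj
        rcases h (j + 1) (by simpa using Nat.succ_lt_succ hj) with h' | h'
        · exact Or.inl (by simpa using h')
        · right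
          have : n ≤ cnt + 4 * ((j : Int) + 1) := by push_cast at h' ⊢; omega
          omega
      congr 1
      rw [List.take_append, entryLen]
      congr 1
      · by_cases hle : max (n - cnt) 0 ≤ 4
        · rw [show (2 * min (max (n - cnt) 0) 4).toNat = (2 * max (n - cnt) 0).toNat by omega]
        · rw [List.take_of_length_le (by rw [entryLen]; omega),
              List.take_of_length_le (by rw [entryLen]; omega)]
      · rw [show (2 * max (n - (cnt + min (max (n - cnt) 0 + 1) 4)) 0).toNat
              = (2 * max (n - cnt) 0).toNat - 8 by omega]
    · have hskip : n ≤ cnt := by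
        rcases h 0 (by simp) with h' | h'
        · exact absurd (by simpa using h') hb
        · simpa using h'
      rw [List.foldl_cons, inner_skip _ _ _ _ _ _ (by omega), fold_skip r n rest out (cnt + 1) (by omega),
          show (2 * max (n - cnt) 0).toNat = 0 by omega]
      simp

theorem flatLen (r : Bool) (l : List Int) :
    (l.flatMap (fun b => pvEntry r b.toNat)).length = 8 * l.length := by
  induction l with
  | nil => rfl
  | cons b rest ih => simp [List.flatMap_cons, entryLen, ih]; omega

theorem getTable (f : Nat → List Char) (b : Int) (h0 : 0 ≤ b) :
    ∀ (ls : List Nat), b.toNat ∈ ls →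
    (PySem.Dict.mk (ls.map (fun (v : Nat) => ((v : Int), f v)))).get? b = some (f b.toNat) := by
  intro ls
  induction ls with
  | nil => simp
  | cons v tl ih =>
    intro hmem
    rw [List.map_cons, PySem.Dict.get?_mk_cons]
    by_cases hv : v = b.toNat
    · subst hv
      simp [Int.toNat_of_nonneg h0]
    · have hne : ¬(((v : Int) == b) = true) := by
        simp only [beq_iff_eq]
        intro hvb
        exact hv (by omega)
      rw [if_neg hne]
      refine ih ?_
      rcases List.mem_cons.mp hmem with h | h
      · exact absurd h.symm hv
      · exact h

theorem pvAeqB : ∀ (gt : List Int) (ext_out : String) (n : Int) (r : Bool),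
    ext_out = ".bed" →
    (∀ j : Fin gt.length, (0 ≤ gt[j] ∧ gt[j] < 256) ∨ n ≤ 4 * (j : Int)) →
    parse_gt_bed gt ext_out n r = parse_gt_bed_alt gt ext_out n r := by
  intro gt ext n r hext hpre
  subst hext
  simp only [parse_gt_bed, parse_gt_bed_alt, ne_eq, not_true_eq_false, if_false]
  rw [foldA r n gt [] 0 (fun j hj => by
    rcases hpre ⟨j, hj⟩ with h | h
    · exact Or.inl h
    · right
      have h' : n ≤ 4 * (j : Int) := h
      omega)]
  by_cases hn : n ≤ 0
  · rw [if_pos hn, show (2 * max (n - 0) 0).toNat = 0 by omega]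
    simp
    rfl
  · rw [if_neg hn]
    have hm : 4 * PySem.Int.floordiv (n + 3) 4 ≤ n + 3 ∧ n ≤ 4 * PySem.Int.floordiv (n + 3) 4 := by
      unfold PySem.Int.floordiv
      rw [Int.fdiv_eq_ediv]
      have h4 : ((0:Int) ≤ 4 ∨ (4:Int) ∣ (n+3)) := Or.inl (by omega)
      rw [if_pos h4]
      omega
    set m := PySem.Int.floordiv (n + 3) 4 with hmdef
    have hnb0 : (0 : Int) ≤ min (gt.length : Int) m := by omega
    rw [PySem.List.slice_to _ hnb0]
    set K := (min (gt.length : Int) m).toNat with hKdef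
    have hcg : (gt.take K).flatMap
          (fun b => PySem.Dict.getD (PySem.Dict.mk ((List.range 256).map (fun (v : Nat) => ((v : Int), pvEntry r v)))) b [])
        = (gt.take K).flatMap (fun b => pvEntry r b.toNat) := by
      simp only [List.flatMap_def]
      refine congrArg _ (List.map_congr_left ?_)
      intro x hx
      obtain ⟨j, hj, rfl⟩ := List.mem_iff_getElem.mp hx
      have hjK : j < K := by have := hj; rw [List.length_take] at this; omega
      have hjlen : j < gt.length := by have := hj; rw [List.length_take] at this; omega
      have hrange : 0 ≤ gt[j] ∧ gt[j] < 256 := by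
        rcases hpre ⟨j, hjlen⟩ with h | h
        · exact h
        · exfalso
          have h' : n ≤ 4 * (j : Int) := h
          omega
      rw [List.getElem_take]
      unfold PySem.Dict.getD
      rw [getTable (pvEntry r) gt[j] hrange.1 (List.range 256) (by
        simp only [List.mem_range]; omega)]
      rfl
    rw [hcg]
    conv_lhs => rw [show gt = gt.take K ++ gt.drop K from (List.take_append_drop _ _).symm]
    rw [List.flatMap_append, List.take_append, flatLen]
    have htk : (gt.take K).length = K := by rw [List.length_take]; omega
    rw [htk, show (2 * max (n - 0) 0).toNat = (2 * n).toNat by omega]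
    have h2 : ((gt.drop K).flatMap (fun b => pvEntry r b.toNat)).take ((2 * n).toNat - 8 * K) = [] := by
      by_cases hlen : gt.length ≤ K
      · rw [List.drop_eq_nil_of_le hlen]; simp
      · have hKm : (K : Int) = m := by omega
        rw [show (2 * n).toNat - 8 * K = 0 by omega]
        simp
    rw [h2, List.append_nil, List.nil_append]

-- ===== VERDICT (by name: the statement is the Claim_ definition above) =====
theorem parse_gt_bed_spec : Claim_equal_parse_gt_bed := by
  intro gt ext_out n_samples bool_rev _ hpre
  unfold Spec_parse_gt_bed
  exact pvAeqB gt ext_out n_samples bool_rev hpre.1 hpre.2
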